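/- GENERATED by tools/from_farm_form.py from prooffarm-gif/accepted/DGifGetExtension.1/Proof.lean (a worked proof of the farm's unit `DGifGetExtension.1`,
   accepted by the verdict) — do not edit. -/
import Gif.Spec.Units.DGifGetExtension_1
import Gif.Spec.AllSegs
import Gif.Spec.Proved.DGifGetExtension_1_Lemmas

open X86 X86.User Asan ProgX.Base ProgX.Base.Spec Gif.Spec

/-!
  `DGifGetExtension.1` (0x109aca … 0x109afb and 0x109b16 … 0x109b45, 23 instructions; dgif_lib.c:572-585): A BODY SEGMENT OF A
  PROTECTED FUNCTION WITH A CALL IN THE MIDDLE. The return address 0x109b28 (`ret4`) of `InternalRead(gif, &Buf, 1)` is not a cut of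
  the design, so the unit makes it one of its own: the private assertion `ge1_AtRet4` (`Body` + the count in `eax`) and two walks
  (Lemmas.lean), chained here. The NOT_READABLE arm (0x109ae8 … 0x109afb, l.577) is dead by `Shape.state` (`pv.FileState = 8`): the
  walker prunes it from the load given as a fact.
-/

/-- Segment 1 of `DGifGetExtension` takes `Start` at 0x109aca to `Done` at 0x109afb or to `AfterRead` at 0x109b45. -/
theorem Gif.Spec.Proved.DGifGetExtension_1_ok : Gif.Spec.DGifGetExtension_1.Statement := by
  unfold Gif.Spec.DGifGetExtension_1.Statement
  intro Lay hLay μ hμ u₀ hcode h_InternalRead h_load8 h_load4 h_store4 H rest frames F R e ret v hat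
  -- the callee's contract for the frame list of the body (the own frame in front) and the request of 1 byte
  have hir := h_InternalRead H rest (DGifGetExtension.framesIn frames e) F R 1
  -- 0x109aca … the call … 0x109b28
  refine (Gif.Spec.DGifGetExtension_1.ge1_seg_call Lay hLay μ hμ u₀ hcode H rest frames F R e ret hir h_load8 h_load4 v hat).trans ?_
  intro v1 hv1
  rcases hv1 with hdone | hret
  · -- the NOT_READABLE arm (never taken): already `Done`
    exact ReachVia.done (Or.inl hdone)
  · -- 0x109b28 … 0x109b45 / 0x109afb
    exact Gif.Spec.DGifGetExtension_1.ge1_seg_tail Lay hLay μ hμ u₀ hcode H rest frames F R e ret h_store4 v1 hret
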